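-- pv_equiv track=rewrite | github.com/ajoyshil/dsa | linkedlist/ll.py | tt
-- ===== SOURCE A (Python) =====
-- def tt(str):
--     d = 0
--     count = 0
--     str = reversed(str)
--     for c in str:
--         if c == 'd':
--             d +=1
--         if c == 'g':
--             count += d
--     return count
-- ===== SOURCE B (Python) =====
-- def tt(str):
--     count = 0
--     for i, c in enumerate(str):
--         if c == 'g':
--             count += str[i+1:].count('d')
--     return count
-- ===== Notes on version B (the rewrite author's own statement) =====
-- stated objective: alternative
-- what changed: Replaces A's single backward pass with a running 'd' counter by a nested brute-force scan: for each 'g' at position i, add the count of 'd' in the suffix str[i+1:]; trades A's O(n) for directness (B is O(n^2)).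
import Mathlib
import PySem

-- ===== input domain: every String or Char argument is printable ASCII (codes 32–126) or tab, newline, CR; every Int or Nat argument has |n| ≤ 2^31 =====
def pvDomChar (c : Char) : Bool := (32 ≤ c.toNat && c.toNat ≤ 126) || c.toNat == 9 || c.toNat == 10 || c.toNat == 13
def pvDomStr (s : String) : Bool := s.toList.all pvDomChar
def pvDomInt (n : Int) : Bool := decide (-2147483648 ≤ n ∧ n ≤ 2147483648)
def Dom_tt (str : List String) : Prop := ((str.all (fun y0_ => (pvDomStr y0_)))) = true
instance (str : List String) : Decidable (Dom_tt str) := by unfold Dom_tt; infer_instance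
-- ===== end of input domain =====

-- B replaces A's single backward pass (running 'd' counter) by a nested brute-force scan:
-- for each 'g' at index i it counts the 'd's in the suffix str[i+1:]; objective: alternative (B is quadratic).

-- ===== PORT A =====
-- A's loop body: two successive ifs on the same state (d, count), over the reversed list
def ttStep (s : Int × Int) (c : String) : Int × Int :=
  let s1 := if c == "d" then (s.1 + 1, s.2) else s
  if c == "g" then (s1.1, s1.2 + s1.1) else s1

def tt (str : List String) : Int :=
  (str.reverse.foldl ttStep (0, 0)).2

-- ===== PORT B =====
-- B's loop: for i, c in enumerate(str): if c == 'g': count += str[i+1:].count('d')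
def tt_alt (str : List String) : Int :=
  (PySem.List.enumerate str).foldl
    (fun acc ic =>
      if ic.2 == "g" then acc + ((PySem.List.slice str (some (ic.1 + 1)) none).count "d" : Int)
      else acc)
    0

-- ===== PRECONDITION & SPEC =====
def Spec_tt (str : List String) (out : Int) : Prop := out = tt_alt str
instance (str : List String) (out : Int) : Decidable (Spec_tt str out) := by unfold Spec_tt; infer_instance

-- ===== CLAIM (what is proved, stated in full; the proofs are below) =====
def Claim_equal_tt : Prop := ∀ (str : List String), Dom_tt str → Spec_tt str (tt str)

-- ===== LEMMAS AND PROOFS =====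

-- characterizations: dc = number of "d"s, pr = (g, d-after-g) pairs
def dc : List String → Int
  | [] => 0
  | c :: l => if c = "d" then dc l + 1 else dc l

def pr : List String → Int
  | [] => 0
  | c :: l => if c = "g" then pr l + dc l else pr l

lemma dc_eq_count (l : List String) : dc l = (l.count "d" : Int) := by
  induction l with
  | nil => simp [dc]
  | cons c l ih =>
    by_cases h : c = "d" <;> simp [dc, h, ih]

-- A's foldl over the reversed list is the foldr of the flipped step
lemma tt_eq_foldr (str : List String) :
    tt str = (str.foldr (fun c s => ttStep s c) (0, 0)).2 := by
  simp [tt, List.foldl_reverse]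

-- A's foldr state is exactly (dc, pr)
lemma foldr_eq (l : List String) :
    l.foldr (fun c s => ttStep s c) (0, 0) = (dc l, pr l) := by
  induction l with
  | nil => simp [dc, pr]
  | cons c l ih =>
    rw [List.foldr_cons, ih]
    by_cases hd : c = "d"
    · subst hd; simp [ttStep, dc, pr]
    · by_cases hg : c = "g"
      · subst hg; simp [ttStep, dc, pr]
      · simp [ttStep, dc, pr, hd, hg]

-- B's fold over the enumeration of a suffix str.drop k, started at index k, adds pr of that suffix
lemma foldl_enum_eq (str : List String) :
    ∀ (l : List String) (k : Nat) (acc : Int), str.drop k = l →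
    (PySem.List.enumerate l (k : Int)).foldl
      (fun acc ic =>
        if ic.2 == "g" then acc + ((PySem.List.slice str (some (ic.1 + 1)) none).count "d" : Int)
        else acc)
      acc = acc + pr l := by
  intro l
  induction l with
  | nil => intro k acc _; simp [PySem.List.enumerate_nil, pr]
  | cons c rest ih =>
    intro k acc hk
    have hdrop : str.drop (k + 1) = rest := by
      rw [← List.tail_drop, hk]; rfl
    rw [PySem.List.enumerate_cons, List.foldl_cons,
        show ((k : Int) + 1) = ((k + 1 : Nat) : Int) by push_cast; ring]
    by_cases hg : c = "g"
    · subst hg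
      simp only [BEq.rfl, if_true]
      rw [PySem.List.slice_from_natCast, hdrop, ih (k + 1) _ hdrop]
      simp [pr, dc_eq_count]
      ring
    · have hne : (c == "g") = false := by simpa using hg
      simp only [hne, Bool.false_eq_true, if_false]
      rw [ih (k + 1) acc hdrop]
      simp [pr, hg]

-- ===== VERDICT (by name: the statement is the Claim_ definition above) =====
theorem tt_spec : Claim_equal_tt := by
  intro str _
  unfold Spec_tt tt_alt
  rw [tt_eq_foldr, foldr_eq]
  have := foldl_enum_eq str str 0 0 (by simp)
  simpa using this.symm
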